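-- pv_equiv track=rewrite | github.com/dravenpri/Sorting-Algorithm-Visualizer | sorting_algos.py | quickSortColor
-- ===== SOURCE A (Python) =====
-- def quickSortColor(datalen, head, tail, border, currindx, isSwaping = False):
--     colorarray = []
--     for i in range(datalen):
--         if i >= head and i <= tail:
--             colorarray.append("gray")
--         else:
--             colorarray.append("#EA706C")
--
--         if i == tail:
--             colorarray[i] = 'blue'
--         elif i == border:
--             colorarray[i] = 'red'
--         elif i == currindx:
--             colorarray[i] = 'yellow'
--
--         if isSwaping:
--             if i == border or i == currindx:
--                 colorarray[i] = 'green'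
--
--     return colorarray
-- ===== SOURCE B (Python) =====
-- def quickSortColor(datalen, head, tail, border, currindx, isSwaping = False):
--     # Bulk build: three constant segments (left red / clamped gray band / right red),
--     # then patch only the special indices, replicating the elif precedence.
--     n = max(datalen, 0)
--     lo = max(head, 0)
--     hi = min(tail, n - 1)
--     if lo <= hi:
--         colors = ["#EA706C"] * lo + ["gray"] * (hi - lo + 1) + ["#EA706C"] * (n - 1 - hi)
--     else:
--         colors = ["#EA706C"] * n
--
--     def set_at(i, c):
--         if 0 <= i < n:
--             colors[i] = c
--
--     set_at(tail, 'blue')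
--     if border != tail:
--         set_at(border, 'red')
--     if currindx != tail and currindx != border:
--         set_at(currindx, 'yellow')
--     if isSwaping:
--         set_at(border, 'green')
--         set_at(currindx, 'green')
--     return colors
-- ===== Notes on version B (the rewrite author's own statement) =====
-- stated objective: faster
-- what changed: A loops over every index appending and then overwriting per-element; B builds the whole list in bulk from three constant segments (left default / clamped gray band / right default via list multiplication) and then patches only the handful of special indices (tail/border/currindx, plus the isSwaping green override), replicating the elif precedence.
import Mathlib
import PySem

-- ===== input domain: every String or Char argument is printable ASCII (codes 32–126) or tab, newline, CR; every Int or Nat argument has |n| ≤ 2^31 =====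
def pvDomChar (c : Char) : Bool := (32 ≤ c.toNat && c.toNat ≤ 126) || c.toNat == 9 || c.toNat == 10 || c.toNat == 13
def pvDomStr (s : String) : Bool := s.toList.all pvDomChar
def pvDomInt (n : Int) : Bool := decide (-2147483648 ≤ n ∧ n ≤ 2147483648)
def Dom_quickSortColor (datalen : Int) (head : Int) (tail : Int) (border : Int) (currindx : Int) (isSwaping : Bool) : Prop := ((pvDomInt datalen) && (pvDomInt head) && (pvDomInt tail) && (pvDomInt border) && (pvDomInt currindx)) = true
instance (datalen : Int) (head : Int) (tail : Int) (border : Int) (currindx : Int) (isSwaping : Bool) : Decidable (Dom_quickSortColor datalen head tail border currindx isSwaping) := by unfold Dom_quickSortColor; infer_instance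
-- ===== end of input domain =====

-- B builds the color list in bulk (three constant segments) and patches only the
-- special indices, instead of A's per-index loop (a timing run measured B faster
-- by a constant factor: bulk list construction instead of per-index Python work).

-- ===== PORT A =====
-- literal port of A: fold over range(datalen); per iteration append the base color,
-- then the elif chain of index assignments, then the isSwaping green override.
def quickSortColor (datalen : Int) (head : Int) (tail : Int) (border : Int) (currindx : Int) (isSwaping : Bool) : List String :=
  (PySem.List.pyRange 0 datalen 1).foldl (fun colorarray i =>
    let colorarray := colorarray ++ [if i ≥ head ∧ i ≤ tail then "gray" else "#EA706C"]
    let colorarray :=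
      if i = tail then colorarray.set i.toNat "blue"
      else if i = border then colorarray.set i.toNat "red"
      else if i = currindx then colorarray.set i.toNat "yellow"
      else colorarray
    if isSwaping then
      (if i = border ∨ i = currindx then colorarray.set i.toNat "green" else colorarray)
    else colorarray) []

-- ===== PORT B =====
-- literal port of Source B: segment construction, then guarded point patches.
def pvSetAt (n : Int) (cs : List String) (i : Int) (c : String) : List String :=
  if 0 ≤ i ∧ i < n then cs.set i.toNat c else cs

def quickSortColor_alt (datalen : Int) (head : Int) (tail : Int) (border : Int) (currindx : Int) (isSwaping : Bool) : List String :=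
  let n := max datalen 0
  let lo := max head 0
  let hi := min tail (n - 1)
  let colors :=
    if lo ≤ hi then
      List.replicate lo.toNat "#EA706C" ++ List.replicate (hi - lo + 1).toNat "gray"
        ++ List.replicate (n - 1 - hi).toNat "#EA706C"
    else
      List.replicate n.toNat "#EA706C"
  let colors := pvSetAt n colors tail "blue"
  let colors := if border ≠ tail then pvSetAt n colors border "red" else colors
  let colors := if currindx ≠ tail ∧ currindx ≠ border then pvSetAt n colors currindx "yellow" else colors
  if isSwaping then pvSetAt n (pvSetAt n colors border "green") currindx "green" else colors

-- ===== PRECONDITION & SPEC =====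
def Spec_quickSortColor (datalen : Int) (head : Int) (tail : Int) (border : Int) (currindx : Int) (isSwaping : Bool) (out : List String) : Prop := out = quickSortColor_alt datalen head tail border currindx isSwaping
instance (datalen : Int) (head : Int) (tail : Int) (border : Int) (currindx : Int) (isSwaping : Bool) (out : List String) : Decidable (Spec_quickSortColor datalen head tail border currindx isSwaping out) := by unfold Spec_quickSortColor; infer_instance

-- ===== CLAIM (what is proved, stated in full; the proofs are below) =====
def Claim_equal_quickSortColor : Prop := ∀ (datalen : Int) (head : Int) (tail : Int) (border : Int) (currindx : Int) (isSwaping : Bool), Dom_quickSortColor datalen head tail border currindx isSwaping → Spec_quickSortColor datalen head tail border currindx isSwaping (quickSortColor datalen head tail border currindx isSwaping)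

-- ===== LEMMAS AND PROOFS =====

-- the color A assigns at index i, as a closed form
def pvColorAt (head tail border currindx : Int) (isSwaping : Bool) (i : Int) : String :=
  let base := if i ≥ head ∧ i ≤ tail then "gray" else "#EA706C"
  let c1 := if i = tail then "blue" else if i = border then "red"
            else if i = currindx then "yellow" else base
  if isSwaping ∧ (i = border ∨ i = currindx) then "green" else c1

theorem pv_set_append_singleton {α : Type} (l : List α) (x y : α) :
    (l ++ [x]).set l.length y = l ++ [y] := by
  induction l with
  | nil => rfl
  | cons a t ih => simp [ih]


theorem pvA_step (head tail border currindx : Int) (isSwaping : Bool) (a : Int)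
    (acc : List String) (hl : acc.length = a.toNat) :
    (fun (colorarray : List String) (i : Int) =>
      let colorarray := colorarray ++ [if i ≥ head ∧ i ≤ tail then "gray" else "#EA706C"]
      let colorarray :=
        if i = tail then colorarray.set i.toNat "blue"
        else if i = border then colorarray.set i.toNat "red"
        else if i = currindx then colorarray.set i.toNat "yellow"
        else colorarray
      if isSwaping then
        (if i = border ∨ i = currindx then colorarray.set i.toNat "green" else colorarray)
      else colorarray) acc a
      = acc ++ [pvColorAt head tail border currindx isSwaping a] := by
  simp only [pvColorAt, ← hl, pv_set_append_singleton]
  split_ifs <;> simp_all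

theorem pv_foldl_append (datalen : Int) (f : List String → Int → List String)
    (col : Int → String)
    (hstep : ∀ (acc : List String) (i : Int), acc.length = i.toNat → f acc i = acc ++ [col i]) :
    ∀ (fuel : Nat) (a : Int), 0 ≤ a → (datalen - a).toNat = fuel →
      ∀ acc : List String, acc.length = a.toNat →
      (PySem.List.pyRange a datalen 1).foldl f acc
        = acc ++ (PySem.List.pyRange a datalen 1).map col := by
  intro fuel
  induction fuel with
  | zero =>
    intro a ha hf acc hl
    rw [PySem.List.pyRange_one_eq_nil (by omega)]
    simp
  | succ n ih =>
    intro a ha hf acc hl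
    rw [PySem.List.pyRange_one_cons (by omega), List.foldl_cons, List.map_cons,
      hstep acc a hl, ih (a + 1) (by omega) (by omega) _ (by simp [hl]; omega)]
    simp

theorem quickSortColor_eq_map (datalen head tail border currindx : Int) (isSwaping : Bool) :
    quickSortColor datalen head tail border currindx isSwaping
      = (PySem.List.pyRange 0 datalen 1).map (pvColorAt head tail border currindx isSwaping) := by
  unfold quickSortColor
  exact pv_foldl_append datalen _ _
    (fun acc i hl => pvA_step head tail border currindx isSwaping i acc hl)
    datalen.toNat 0 (by omega) (by omega) [] rfl

theorem pvBase_eq (datalen head tail : Int) :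
    (if max head 0 ≤ min tail (max datalen 0 - 1) then
       List.replicate (max head 0).toNat "#EA706C"
         ++ List.replicate (min tail (max datalen 0 - 1) - max head 0 + 1).toNat "gray"
         ++ List.replicate (max datalen 0 - 1 - min tail (max datalen 0 - 1)).toNat "#EA706C"
     else List.replicate (max datalen 0).toNat "#EA706C")
    = (PySem.List.pyRange 0 datalen 1).map
        (fun i => if i ≥ head ∧ i ≤ tail then "gray" else "#EA706C") := by
  split_ifs with h
  · apply List.ext_getElem
    · simp [PySem.List.length_pyRange_one]; omega
    · intro j h1 h2
      simp only [List.length_append, List.length_replicate, List.length_map,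
        PySem.List.length_pyRange_one] at h1 h2
      simp only [List.getElem_map, PySem.List.getElem_pyRange_one, List.getElem_append,
        List.getElem_replicate, List.length_append, List.length_replicate]
      split_ifs <;> first | rfl | omega | (exfalso; omega)
  · apply List.ext_getElem
    · simp [PySem.List.length_pyRange_one]; omega
    · intro j h1 h2
      simp only [List.length_replicate, List.length_map, PySem.List.length_pyRange_one] at h1 h2
      simp only [List.getElem_map, PySem.List.getElem_pyRange_one, List.getElem_replicate]
      split_ifs <;> first | rfl | omega | (exfalso; omega)

theorem pvSetAt_map (datalen : Int) (g : Int → String) (i : Int) (c : String) :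
    pvSetAt (max datalen 0) ((PySem.List.pyRange 0 datalen 1).map g) i c
      = (PySem.List.pyRange 0 datalen 1).map (fun j => if j = i then c else g j) := by
  unfold pvSetAt
  split_ifs with h
  · apply List.ext_getElem
    · simp
    · intro j h1 h2
      simp only [List.getElem_set, List.getElem_map, PySem.List.getElem_pyRange_one]
      split_ifs <;> first | rfl | omega | (exfalso; omega)
  · symm
    apply List.map_congr_left
    intro a ha
    rw [PySem.List.mem_pyRange_one] at ha
    rw [if_neg]
    omega

theorem pvSetAt_map_ite (datalen : Int) (g : Int → String) (i : Int) (c : String)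
    (p : Prop) [Decidable p] :
    (if p then pvSetAt (max datalen 0) ((PySem.List.pyRange 0 datalen 1).map g) i c
     else (PySem.List.pyRange 0 datalen 1).map g)
      = (PySem.List.pyRange 0 datalen 1).map (fun j => if p ∧ j = i then c else g j) := by
  split_ifs with hp
  · rw [pvSetAt_map]
    apply List.map_congr_left
    intro a _
    simp [hp]
  · symm
    apply List.map_congr_left
    intro a _
    simp [hp]

theorem quickSortColor_alt_eq_map (datalen head tail border currindx : Int) (isSwaping : Bool) :
    quickSortColor_alt datalen head tail border currindx isSwaping
      = (PySem.List.pyRange 0 datalen 1).map (pvColorAt head tail border currindx isSwaping) := by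
  unfold quickSortColor_alt
  dsimp only
  rw [pvBase_eq, pvSetAt_map, pvSetAt_map_ite, pvSetAt_map_ite]
  cases isSwaping with
  | false =>
    simp only [Bool.false_eq_true, if_false]
    apply List.map_congr_left
    intro a ha
    rw [PySem.List.mem_pyRange_one] at ha
    simp only [pvColorAt]
    split_ifs <;> first | rfl | omega | (exfalso; omega) | tauto
  | true =>
    simp only [if_true]
    rw [pvSetAt_map, pvSetAt_map]
    apply List.map_congr_left
    intro a ha
    rw [PySem.List.mem_pyRange_one] at ha
    simp only [pvColorAt]
    split_ifs <;> first | rfl | omega | (exfalso; omega) | tauto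

-- ===== VERDICT (by name: the statement is the Claim_ definition above) =====
theorem quickSortColor_spec : Claim_equal_quickSortColor := by
  intro datalen head tail border currindx isSwaping _
  unfold Spec_quickSortColor
  rw [quickSortColor_eq_map, quickSortColor_alt_eq_map]
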